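-- pv_equiv track=rewrite | github.com/akankshanayak2111/coding_practice | largest_smaller_than.py | find_largest_smaller_than
-- ===== SOURCE A (Python) =====
-- def find_largest_smaller_than(nums, xnumber):
--     """Find largest number in sorted list that is smaller than given number."""
--
--     max_num = nums[0]
--     max_idx = 0
--
--     for idx, num in enumerate(nums):
--         if num > max_num and num < xnumber:
--             max_num = num
--             max_idx = idx
--
--     return max_idx
-- ===== SOURCE B (Python) =====
-- def find_largest_smaller_than(nums, xnumber):
--     """Find largest number in sorted list that is smaller than given number."""
--     first = nums[0]
--     cands = [v for v in nums if first < v < xnumber]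
--     return nums.index(max(cands)) if cands else 0
-- ===== Notes on version B (the rewrite author's own statement) =====
-- stated objective: simpler
-- what changed: Replaces the running-max/running-index loop with a declarative two-pass form: filter the candidates greater than nums[0] and smaller than xnumber, then return the first index of their maximum (0 if none).
import Mathlib
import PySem

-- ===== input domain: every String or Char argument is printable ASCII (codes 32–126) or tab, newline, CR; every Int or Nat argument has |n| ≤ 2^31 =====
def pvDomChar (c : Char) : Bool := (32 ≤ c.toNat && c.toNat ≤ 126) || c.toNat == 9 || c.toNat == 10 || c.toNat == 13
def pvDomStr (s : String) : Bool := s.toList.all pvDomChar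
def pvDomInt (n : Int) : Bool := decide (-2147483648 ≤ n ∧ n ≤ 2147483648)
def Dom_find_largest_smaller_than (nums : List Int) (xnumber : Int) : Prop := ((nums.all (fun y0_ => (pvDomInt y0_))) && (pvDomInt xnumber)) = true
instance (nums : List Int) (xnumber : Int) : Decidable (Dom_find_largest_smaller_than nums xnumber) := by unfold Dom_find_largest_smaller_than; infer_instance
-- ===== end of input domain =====

-- B replaces A's running-max/running-index loop by a declarative two-pass form
-- (filter the candidates, take their maximum, return its first index); same cost, simpler.

-- ===== PORT A =====
def find_largest_smaller_than (nums : List Int) (xnumber : Int) : Int :=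
  match nums with
  | [] => 0  -- unreachable under Pre_: nums[0] raises IndexError on []
  | h :: _ =>
    ((PySem.List.enumerate nums 0).foldl
      (fun (s : Int × Int) (p : Int × Int) =>
        if p.2 > s.1 ∧ p.2 < xnumber then (p.2, p.1) else s)
      (h, 0)).2

-- ===== PORT B =====
def find_largest_smaller_than_alt (nums : List Int) (xnumber : Int) : Int :=
  match nums with
  | [] => 0  -- unreachable under Pre_: nums[0] raises IndexError on []
  | first :: _ =>
    let cands := nums.filter (fun v => decide (first < v ∧ v < xnumber))
    match PySem.List.max? cands (fun v => v) with
    | some m => ((PySem.List.index? nums m).getD 0 : Nat)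
    | none => 0

-- ===== PRECONDITION & SPEC =====
-- A evaluates nums[0], which raises IndexError on the empty list.
def Pre_find_largest_smaller_than (nums : List Int) (_xnumber : Int) : Prop := nums ≠ []
instance (nums : List Int) (xnumber : Int) : Decidable (Pre_find_largest_smaller_than nums xnumber) := by unfold Pre_find_largest_smaller_than; infer_instance
def pvWitness_find_largest_smaller_than : List Int × Int := ([1, 3, 2], 3)

def Spec_find_largest_smaller_than (nums : List Int) (xnumber : Int) (out : Int) : Prop := out = find_largest_smaller_than_alt nums xnumber
instance (nums : List Int) (xnumber : Int) (out : Int) : Decidable (Spec_find_largest_smaller_than nums xnumber out) := by unfold Spec_find_largest_smaller_than; infer_instance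

-- ===== CLAIM (what is proved, stated in full; the proofs are below) =====
def Claim_equal_find_largest_smaller_than : Prop := ∀ (nums : List Int) (xnumber : Int), Dom_find_largest_smaller_than nums xnumber → Pre_find_largest_smaller_than nums xnumber → Spec_find_largest_smaller_than nums xnumber (find_largest_smaller_than nums xnumber)

-- ===== LEMMAS AND PROOFS =====

-- Specification of A's fold: the filtered candidates' maximum with its first position.
def pvBest (x m j : Int) (ps : List (Int × Int)) : Int × Int :=
  match PySem.List.max? ((ps.filter (fun p => decide (m < p.2 ∧ p.2 < x))).map Prod.snd) (fun v => v) with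
  | some M =>
    (M, (((ps.filter (fun p => decide (m < p.2 ∧ p.2 < x))).find? (fun p => p.2 == M)).map Prod.fst).getD j)
  | none => (m, j)

theorem pv_max?_id_eq_some {l : List Int} {M : Int} (hM : M ∈ l)
    (hle : ∀ y ∈ l, y ≤ M) : PySem.List.max? l (fun v => v) = some M := by
  cases h : PySem.List.max? l (fun v => v) with
  | none =>
    rw [PySem.List.max?_eq_none_iff] at h
    subst h; cases hM
  | some M' =>
    have h1 := PySem.List.max?_mem h
    have h2 := PySem.List.max?_isMax h M hM
    have h3 := hle M' h1
    exact congrArg some (le_antisymm h3 h2)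

theorem pv_find?_filter {α : Type} (l : List α) (pr q : α → Bool)
    (h : ∀ a, pr a = true → q a = true) :
    (l.filter q).find? pr = l.find? pr := by
  induction l with
  | nil => rfl
  | cons a t ih =>
    by_cases hq : q a = true
    · by_cases hp : pr a = true <;> simp [hq, List.find?, hp, ih]
    · have hp : pr a = false := by
        cases hpa : pr a with
        | false => rfl
        | true => exact absurd (h a hpa) hq
      simp [hq, List.find?, hp, ih]

theorem pv_fold_eq_pvBest (x : Int) (ps : List (Int × Int)) :
    ∀ m j : Int,
      ps.foldl (fun (s : Int × Int) (p : Int × Int) =>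
        if p.2 > s.1 ∧ p.2 < x then (p.2, p.1) else s) (m, j) = pvBest x m j ps := by
  induction ps with
  | nil =>
    intro m j
    have : PySem.List.max? ([] : List Int) (fun v => v) = none :=
      (PySem.List.max?_eq_none_iff _ _).2 rfl
    simp [pvBest, this]
  | cons p t ih =>
    intro m j
    by_cases hc : p.2 > m ∧ p.2 < x
    · -- the head updates the running maximum
      have hstep : (if p.2 > (m, j).1 ∧ p.2 < x then (p.2, p.1) else (m, j)) = (p.2, p.1) :=
        if_pos hc
      rw [List.foldl_cons, hstep, ih p.2 p.1]
      -- show pvBest x m j (p :: t) = pvBest x p.2 p.1 t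
      have hdec : decide (m < p.2 ∧ p.2 < x) = true := decide_eq_true ⟨hc.1, hc.2⟩
      unfold pvBest
      simp only [List.filter_cons, hdec, if_true]
      cases hS : PySem.List.max? ((t.filter (fun q => decide (p.2 < q.2 ∧ q.2 < x))).map Prod.snd) (fun v => v) with
      | none =>
        -- no candidate in t beats p.2 : both sides are (p.2, p.1)
        rw [PySem.List.max?_eq_none_iff _ _, List.map_eq_nil_iff, List.filter_eq_nil_iff] at hS
        have hmax : PySem.List.max? ((p :: t.filter (fun q => decide (m < q.2 ∧ q.2 < x))).map Prod.snd) (fun v => v) = some p.2 := by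
          apply pv_max?_id_eq_some
          · simp
          · intro y hy
            rcases List.mem_map.1 hy with ⟨q, hq, rfl⟩
            rcases List.mem_cons.1 hq with rfl | hq'
            · exact le_refl _
            · rcases List.mem_filter.1 hq' with ⟨hqt, hqd⟩
              have hqd' := of_decide_eq_true hqd
              by_contra hgt
              push Not at hgt
              exact hS q hqt (decide_eq_true ⟨hgt, hqd'.2⟩)
        rw [hmax]
        simp [List.find?]
      | some M' =>
        -- some candidate in t beats p.2 : both sides pick the overall maximum M'
        have hMmem := PySem.List.max?_mem hS
        rcases List.mem_map.1 hMmem with ⟨qM, hqM, hqM2⟩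
        rcases List.mem_filter.1 hqM with ⟨hqMt, hqMd⟩
        have hqMd' := of_decide_eq_true hqMd
        have hM1 : p.2 < M' := by rw [← hqM2]; exact hqMd'.1
        have hM2 : M' < x := by rw [← hqM2]; exact hqMd'.2
        have hmax : PySem.List.max? ((p :: t.filter (fun q => decide (m < q.2 ∧ q.2 < x))).map Prod.snd) (fun v => v) = some M' := by
          apply pv_max?_id_eq_some
          · refine List.mem_cons.2 (Or.inr ?_)
            exact List.mem_map.2 ⟨qM, List.mem_filter.2 ⟨hqMt,
              decide_eq_true ⟨lt_trans hc.1 hqMd'.1, hqMd'.2⟩⟩, hqM2⟩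
          · intro y hy
            rcases List.mem_cons.1 hy with rfl | hy'
            · exact le_of_lt hM1
            · rcases List.mem_map.1 hy' with ⟨q, hq, rfl⟩
              rcases List.mem_filter.1 hq with ⟨hqt, hqd⟩
              have hqd' := of_decide_eq_true hqd
              by_cases hgt : p.2 < q.2
              · exact PySem.List.max?_isMax hS q.2
                  (List.mem_map.2 ⟨q, List.mem_filter.2 ⟨hqt,
                    decide_eq_true ⟨hgt, hqd'.2⟩⟩, rfl⟩)
              · exact le_of_lt (lt_of_le_of_lt (not_lt.1 hgt) hM1)
        rw [hmax]
        -- both find? calls reduce to a find? over t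
        have hne : (p.2 == M') = false := by
          simpa using ne_of_lt hM1
        have hf1 : ((p :: t.filter (fun q => decide (m < q.2 ∧ q.2 < x))).find? (fun q => q.2 == M'))
            = t.find? (fun q => q.2 == M') := by
          rw [List.find?_cons_of_neg (by simp [hne])]
          apply pv_find?_filter
          intro a ha
          have : a.2 = M' := by simpa using ha
          exact decide_eq_true ⟨lt_trans hc.1 (this ▸ hM1), this ▸ hM2⟩
        have hf2 : ((t.filter (fun q => decide (p.2 < q.2 ∧ q.2 < x))).find? (fun q => q.2 == M'))
            = t.find? (fun q => q.2 == M') := by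
          apply pv_find?_filter
          intro a ha
          have : a.2 = M' := by simpa using ha
          exact decide_eq_true ⟨this ▸ hM1, this ▸ hM2⟩
        have hsome : (t.find? (fun q => q.2 == M')).isSome := by
          rw [List.find?_isSome]
          exact ⟨qM, hqMt, by simp [hqM2]⟩
        rcases Option.isSome_iff_exists.1 hsome with ⟨r, hr⟩
        simp only [hf1, hf2, hr, Option.map_some, Option.getD_some]
    · -- the head does not update the state
      have hstep : (if p.2 > (m, j).1 ∧ p.2 < x then (p.2, p.1) else (m, j)) = (m, j) :=
        if_neg hc
      rw [List.foldl_cons, hstep, ih m j]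
      have hd : decide (m < p.2 ∧ p.2 < x) = false := by
        simpa using hc
      simp only [pvBest, List.filter_cons, hd, Bool.false_eq_true, if_false]

theorem pv_map_snd_filter_enumerate (nums : List Int) (q : Int → Bool) :
    ∀ s : Int, ((PySem.List.enumerate nums s).filter (fun p => q p.2)).map Prod.snd
      = nums.filter q := by
  induction nums with
  | nil => intro s; simp [PySem.List.enumerate_nil]
  | cons a t ih =>
    intro s
    rw [PySem.List.enumerate_cons, List.filter_cons]
    by_cases hq : q a = true
    · simp [hq, ih]
    · simp [hq, ih]

theorem pv_find?_enumerate (nums : List Int) (M : Int) :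
    ∀ s : Int, (PySem.List.enumerate nums s).find? (fun p => p.2 == M)
      = (PySem.List.index? nums M).map (fun k => ((s + (k : Int)), M)) := by
  induction nums with
  | nil => intro s; simp [PySem.List.enumerate_nil, PySem.List.index?_eq_idxOf?]
  | cons a t ih =>
    intro s
    rw [PySem.List.enumerate_cons]
    by_cases ha : a = M
    · subst ha
      rw [List.find?_cons_of_pos (by simp), PySem.List.index?_cons_self]
      simp
    · rw [List.find?_cons_of_neg (by simp [ha]), ih (s + 1),
        PySem.List.index?_cons_of_ne _ (by simpa using ha)]
      cases PySem.List.index? t M with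
      | none => rfl
      | some k => simp [Option.map]; ring

-- ===== VERDICT (by name: the statement is the Claim_ definition above) =====
theorem find_largest_smaller_than_spec : Claim_equal_find_largest_smaller_than := by
  intro nums xnumber _ hpre
  unfold Spec_find_largest_smaller_than
  match nums with
  | [] => exact absurd rfl hpre
  | h :: t =>
    show (match h :: t with
      | [] => (0 : Int)
      | h' :: _ =>
        ((PySem.List.enumerate (h :: t) 0).foldl
          (fun (s : Int × Int) (p : Int × Int) =>
            if p.2 > s.1 ∧ p.2 < xnumber then (p.2, p.1) else s) (h', 0)).2) = _
    simp only [find_largest_smaller_than_alt]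
    rw [pv_fold_eq_pvBest]
    unfold pvBest
    rw [pv_map_snd_filter_enumerate (h :: t) (fun v => decide (h < v ∧ v < xnumber)) 0]
    cases hM : PySem.List.max? ((h :: t).filter (fun v => decide (h < v ∧ v < xnumber))) (fun v => v) with
    | none => simp
    | some M =>
      have hMmem := PySem.List.max?_mem hM
      rcases List.mem_filter.1 hMmem with ⟨hMl, hMd⟩
      have hMd' := of_decide_eq_true hMd
      have hff : ((PySem.List.enumerate (h :: t) 0).filter
            (fun p => decide (h < p.2 ∧ p.2 < xnumber))).find? (fun p => p.2 == M)
          = (PySem.List.enumerate (h :: t) 0).find? (fun p => p.2 == M) := by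
        apply pv_find?_filter
        intro a ha
        have ha' : a.2 = M := by simpa using ha
        exact decide_eq_true ⟨ha' ▸ hMd'.1, ha' ▸ hMd'.2⟩
      rcases Option.isSome_iff_exists.1 ((PySem.List.index?_isSome_iff _ _).2 hMl) with ⟨k, hk⟩
      simp only [hff, pv_find?_enumerate (h :: t) M 0, hk]
      simp
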